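-- pv_equiv track=rewrite | github.com/entwanne/advent-of-code | 2023/d13_p2.py | _find_new_reflections
-- ===== SOURCE A (Python) =====
-- def find_reflections(pattern, n=1):
--     reflections = set()
--     for y in range(0, len(pattern) - 1):
--         up = pattern[y::-1]
--         down = pattern[y+1:]
--         if all(up_line == down_line for up_line, down_line in zip(up, down)):
--             reflections.add(n * (y + 1))
--     return reflections
--
-- def _find_new_reflections(pattern, n=1):
--     pattern = [list(row) for row in pattern]
--     for line in pattern:
--         for x, char in enumerate(line):
--             if char == '.':
--                 line[x] = '#'
--             else:
--                 line[x] = '.'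
--             yield find_reflections(pattern, n=n)
--             line[x] = char
-- ===== SOURCE B (Python) =====
-- # Faster re-implementation: precompute per-pair row mismatch counts once, then
-- # answer each single-cell flip by an O(1)-per-reflection-line delta update.
-- def _find_new_reflections(pattern, n=1):
--     grid = [list(row) for row in pattern]
--     L = len(grid)
--
--     def row_diff(i, j):
--         # None if rows i and j can never be equal (different lengths),
--         # else the number of differing cells.
--         if len(grid[i]) != len(grid[j]):
--             return None
--         return sum(1 for a, b in zip(grid[i], grid[j]) if a != b)
--
--     # m[i][t] describes the row pair (i, i + 1 + 2*t) (only odd-sum pairs matter)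
--     m = [[row_diff(i, j) for j in range(i + 1, L, 2)] for i in range(L)]
--     # width[y]: how many row pairs a reflection line after row y compares
--     width = [min(y + 1, L - 1 - y) for y in range(L - 1)]
--     # base[y]: how many of those pairs are unequal in the unflipped grid
--     base = [sum(1 for t in range(width[y]) if m[y - t][t] != 0)
--             for y in range(L - 1)]
--
--     for r in range(L):
--         for c, ch in enumerate(grid[r]):
--             flipped = '#' if ch == '.' else '.'
--             res = set()
--             for y in range(L - 1):
--                 u = base[y]
--                 p = 2 * y + 1 - r            # partner row of r across line y
--                 t = y - min(r, p)
--                 if t < width[y]:             # the flipped row is compared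
--                     mm = m[min(r, p)][t]
--                     if mm is not None:
--                         other = grid[p][c]
--                         nm = mm - (1 if ch != other else 0) + (1 if flipped != other else 0)
--                         u += (1 if nm != 0 else 0) - (1 if mm != 0 else 0)
--                 if u == 0:
--                     res.add(n * (y + 1))
--             yield res
-- ===== Notes on version B (the rewrite author's own statement) =====
-- stated objective: faster
-- what changed: Instead of re-running the full reflection search (which re-compares whole row slices) for every single-cell flip, B precomputes per-row-pair mismatch counts and per-line unequal-pair counts once, then answers each flip with an O(1) delta update per candidate reflection line.
import Mathlib
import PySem

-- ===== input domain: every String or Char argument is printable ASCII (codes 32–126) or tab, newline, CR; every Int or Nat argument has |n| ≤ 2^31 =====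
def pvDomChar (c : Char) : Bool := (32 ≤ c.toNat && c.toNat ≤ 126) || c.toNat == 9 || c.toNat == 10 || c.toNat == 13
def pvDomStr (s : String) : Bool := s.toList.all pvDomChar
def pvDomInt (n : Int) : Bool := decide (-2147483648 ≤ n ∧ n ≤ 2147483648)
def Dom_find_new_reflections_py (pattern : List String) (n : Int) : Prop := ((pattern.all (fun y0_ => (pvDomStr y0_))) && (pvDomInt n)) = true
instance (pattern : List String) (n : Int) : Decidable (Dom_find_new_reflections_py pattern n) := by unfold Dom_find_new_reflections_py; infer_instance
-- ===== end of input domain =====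

-- B replaces per-flip full reflection recomputation by precomputed row-pair mismatch
-- counts plus an O(1) delta per reflection line (objective: faster).

-- B replaces per-flip full reflection recomputation by precomputed row-pair mismatch
-- counts plus an O(1) delta per reflection line (objective: faster).


-- ===== PORT A =====
def pv_find_reflections (pattern : List (List Char)) (n : Int) : List Int :=
  (PySem.List.pyRange 0 ((pattern.length : Int) - 1) 1).foldl
    (fun reflections y =>
      let up := (PySem.List.slice? pattern (some y) none (-1)).getD []
      let down := PySem.List.slice pattern (some (y + 1)) none
      if (up.zip down).all (fun pr => pr.1 == pr.2) then
        PySem.Set.add reflections (n * (y + 1))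
      else reflections)
    PySem.Set.empty

def find_new_reflections_py (pattern : List String) (n : Int) : List (List Int) :=
  let grid := pattern.map (fun row => row.toList)
  (PySem.List.enumerate grid).foldl (fun out rl =>
    (PySem.List.enumerate rl.2).foldl (fun out xc =>
      let flipped := if xc.2 == '.' then '#' else '.'
      let g' := PySem.List.pySetD grid rl.1 (PySem.List.pySetD rl.2 xc.1 flipped)
      out ++ [pv_find_reflections g' n]) out) []

-- ===== PORT B =====
def pv_row_diff (grid : List (List Char)) (i j : Int) : Option Int :=
  let gi := PySem.List.pyGetD grid i []
  let gj := PySem.List.pyGetD grid j []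
  if gi.length ≠ gj.length then none
  else some (((gi.zip gj).map (fun ab => if ab.1 ≠ ab.2 then (1 : Int) else 0)).sum)

def pv_mk_m (grid : List (List Char)) (L : Int) : List (List (Option Int)) :=
  (PySem.List.pyRange 0 L 1).map (fun i =>
    (PySem.List.pyRange (i + 1) L 2).map (fun j => pv_row_diff grid i j))

def pv_mk_width (L : Int) : List Int :=
  (PySem.List.pyRange 0 (L - 1) 1).map (fun y => min (y + 1) (L - 1 - y))

def pv_mk_base (m : List (List (Option Int))) (width : List Int) (L : Int) : List Int :=
  (PySem.List.pyRange 0 (L - 1) 1).map (fun y =>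
    ((PySem.List.pyRange 0 (PySem.List.pyGetD width y 0) 1).map (fun t =>
      if PySem.List.pyGetD (PySem.List.pyGetD m (y - t) []) t none ≠ some 0 then (1 : Int) else 0)).sum)

def pv_flip_set (grid : List (List Char)) (n : Int) (m : List (List (Option Int)))
    (width base : List Int) (L r : Int) (cc : Int × Char) : List Int :=
  let ch := cc.2
  let flipped := if ch == '.' then '#' else '.'
  (PySem.List.pyRange 0 (L - 1) 1).foldl (fun res y =>
    let u0 := PySem.List.pyGetD base y 0
    let p := 2 * y + 1 - r
    let t := y - min r p
    let u :=
      if t < PySem.List.pyGetD width y 0 then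
        match PySem.List.pyGetD (PySem.List.pyGetD m (min r p) []) t none with
        | none => u0
        | some mm =>
          let other := PySem.List.pyGetD (PySem.List.pyGetD grid p []) cc.1 ' '
          let nm := mm - (if ch ≠ other then (1 : Int) else 0) + (if flipped ≠ other then 1 else 0)
          u0 + ((if nm ≠ 0 then (1 : Int) else 0) - (if mm ≠ 0 then 1 else 0))
      else u0
    if u == 0 then PySem.Set.add res (n * (y + 1)) else res)
    PySem.Set.empty

def find_new_reflections_py_alt (pattern : List String) (n : Int) : List (List Int) :=
  let grid := pattern.map (fun row => row.toList)
  let L : Int := (grid.length : Int)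
  let m := pv_mk_m grid L
  let width := pv_mk_width L
  let base := pv_mk_base m width L
  (PySem.List.pyRange 0 L 1).foldl (fun out r =>
    (PySem.List.enumerate (PySem.List.pyGetD grid r [])).foldl (fun out cc =>
      out ++ [pv_flip_set grid n m width base L r cc]) out) []

-- ===== PRECONDITION & SPEC =====
def Spec_find_new_reflections_py (pattern : List String) (n : Int) (out : List (List Int)) : Prop := out = find_new_reflections_py_alt pattern n
instance (pattern : List String) (n : Int) (out : List (List Int)) : Decidable (Spec_find_new_reflections_py pattern n out) := by unfold Spec_find_new_reflections_py; infer_instance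

-- ===== CLAIM =====
def Claim_equal_find_new_reflections_py : Prop := ∀ (pattern : List String) (n : Int), Dom_find_new_reflections_py pattern n → Spec_find_new_reflections_py pattern n (find_new_reflections_py pattern n)

-- ===== LEMMAS AND PROOFS =====

theorem pv_filterMap_range_eq_map {α : Type} (g : Nat → Option α) (f : Nat → α) (m : Nat)
    (h : ∀ k, k < m → g k = some (f k)) :
    List.filterMap g (List.range m) = (List.range m).map f := by
  induction m with
  | zero => rfl
  | succ m ih =>
    rw [List.range_succ, List.filterMap_append, List.map_append,
      ih (fun k hk => h k (by omega))]
    simp [h m (by omega)]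

theorem pv_slice_rev (xs : List (List Char)) (y : Nat) (hy : y < xs.length) :
    (PySem.List.slice? xs (some (y : Int)) none (-1)).getD [] = (xs.take (y + 1)).reverse := by
  have hmin : min (y : Int) ((xs.length : Int) - 1) = (y : Int) := by omega
  have h1 : PySem.List.slice? xs (some (y : Int)) none (-1) =
      some (List.filterMap (fun k : Nat => xs[((y : Int) + -(k : Int)).toNat]?) (List.range (y + 1))) := by
    simp only [PySem.List.slice?, PySem.List.sliceIndices]
    have h0 : ¬((y : Int) < 0) := by omega
    have h2 : (-1 : Int) < (y : Int) := by omega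
    norm_num [hmin, h0, h2]
  rw [h1, Option.getD_some]
  rw [pv_filterMap_range_eq_map (f := fun k => xs.getD (y - k) [])]
  · apply List.ext_getElem
    · simp; omega
    · intro i h1 h2
      have hyi : y - i < xs.length := by omega
      simp only [List.getElem_map, List.getElem_range, List.getElem_reverse, List.getElem_take]
      rw [List.getD_eq_getElem?_getD, List.getElem?_eq_getElem hyi, Option.getD_some]
      congr 1
      simp at h2 ⊢
      omega
  · intro k hk
    have h3 : ((y : Int) + -(k : Int)).toNat = y - k := by omega
    rw [h3, List.getElem?_eq_getElem (by omega)]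
    rw [List.getD_eq_getElem?_getD, List.getElem?_eq_getElem (by omega), Option.getD_some]

theorem pv_zip_all_eq (xs ys : List (List Char)) :
    ((xs.zip ys).all (fun pr => pr.1 == pr.2)) =
      decide (∀ t, t < min xs.length ys.length → xs.getD t [] = ys.getD t []) := by
  induction xs generalizing ys with
  | nil => simp
  | cons a as ih =>
    cases ys with
    | nil => simp
    | cons b bs =>
      simp only [List.zip_cons_cons, List.all_cons, ih]
      have hm : min (a :: as).length (b :: bs).length = min as.length bs.length + 1 := by
        simp
      rw [hm]
      by_cases hab : a = b
      · simp only [hab, beq_self_eq_true, Bool.true_and]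
        rw [decide_eq_decide]
        constructor
        · intro h t ht
          cases t with
          | zero => simp
          | succ t => simpa using h t (by omega)
        · intro h t ht
          simpa using h (t + 1) (by omega)
      · have : (a == b) = false := by simp [hab]
        rw [this, Bool.false_and, eq_comm, decide_eq_false_iff_not]
        intro h
        exact hab (by simpa using h 0 (by omega))

def pvRow (g : List (List Char)) (i : Nat) : List Char := g.getD i []
def pvK (len y : Nat) : Nat := min (y + 1) (len - 1 - y)
def pvBad (g : List (List Char)) (y t : Nat) : Bool := !(pvRow g (y - t) == pvRow g (y + 1 + t))
def pvCnt (g : List (List Char)) (y : Nat) : Nat := (List.range (pvK g.length y)).countP (pvBad g y)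

theorem pv_condA (g : List (List Char)) (y : Nat) (hy : y + 1 < g.length) :
    (((PySem.List.slice? g (some (y : Int)) none (-1)).getD []).zip
        (PySem.List.slice g (some ((y : Int) + 1)) none)).all (fun pr => pr.1 == pr.2) =
      (pvCnt g y == 0) := by
  rw [pv_slice_rev g y (by omega)]
  rw [show ((y : Int) + 1) = ((y + 1 : Nat) : Int) from by push_cast; ring]
  rw [PySem.List.slice_from_natCast]
  rw [pv_zip_all_eq]
  have hK : min (g.take (y+1)).reverse.length (g.drop (y+1)).length = pvK g.length y := by
    simp [pvK]; omega
  rw [hK]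
  have hup : ∀ t, t < pvK g.length y → (g.take (y+1)).reverse.getD t [] = g.getD (y - t) [] := by
    intro t ht
    have h1 : t < y + 1 := by have := ht; simp [pvK] at this; omega
    have h2 : y - t < g.length := by omega
    have hlt : t < (g.take (y+1)).reverse.length := by simp; omega
    rw [List.getD_eq_getElem?_getD, List.getElem?_eq_getElem hlt, Option.getD_some,
      List.getElem_reverse, List.getElem_take,
      List.getD_eq_getElem?_getD, List.getElem?_eq_getElem h2, Option.getD_some]
    congr 1
    simp at hlt ⊢
    omega
  have hdown : ∀ t, t < pvK g.length y → (g.drop (y+1)).getD t [] = g.getD (y + 1 + t) [] := by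
    intro t ht
    have h1 : t < pvK g.length y := ht
    simp [pvK] at h1
    have h2 : y + 1 + t < g.length := by omega
    have hlt : t < (g.drop (y+1)).length := by simp; omega
    rw [List.getD_eq_getElem?_getD, List.getElem?_eq_getElem hlt, Option.getD_some,
      List.getElem_drop, List.getD_eq_getElem?_getD, List.getElem?_eq_getElem h2, Option.getD_some]
  have : (pvCnt g y == 0) = decide (pvCnt g y = 0) := by
    cases h : pvCnt g y == 0 <;> simp_all
  rw [this, decide_eq_decide, pvCnt, List.countP_eq_zero]
  constructor
  · intro h x hx
    simp only [List.mem_range] at hx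
    have hx2 := h x hx
    rw [hup x hx, hdown x hx, List.getD_eq_getElem?_getD, List.getD_eq_getElem?_getD] at hx2
    simp [pvBad, pvRow, hx2]
  · intro h t ht
    rw [hup t ht, hdown t ht]
    have := h t (List.mem_range.mpr ht)
    simpa [pvBad, pvRow] using this

theorem pv_countP_update (K t0 : Nat) (f h : Nat → Bool) (ht0 : t0 < K)
    (hag : ∀ t, t < K → t ≠ t0 → f t = h t) :
    ((List.range K).countP f : Int) =
      ((List.range K).countP h : Int) - (if h t0 then 1 else 0) + (if f t0 then 1 else 0) := by
  have hmem : t0 ∈ List.range K := List.mem_range.mpr ht0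
  have hperm := List.perm_cons_erase hmem
  rw [hperm.countP_eq f, hperm.countP_eq h]
  have herase : ∀ x ∈ (List.range K).erase t0, f x = h x := by
    intro x hx
    have := (List.nodup_range.mem_erase_iff).mp hx
    exact hag x (List.mem_range.mp this.2) this.1
  rw [List.countP_cons, List.countP_cons, List.countP_congr (fun x hx => by rw [herase x hx])]
  by_cases hf : f t0 <;> by_cases hh : h t0 <;> simp [hf, hh]

def pvColCnt (u v : List Char) : Nat :=
  (List.range (min u.length v.length)).countP (fun j => !(u.getD j ' ' == v.getD j ' '))

theorem pv_zip_sum_ne (u v : List Char) :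
    ((u.zip v).map (fun ab => if ab.1 ≠ ab.2 then (1 : Int) else 0)).sum = (pvColCnt u v : Int) := by
  induction u generalizing v with
  | nil => simp [pvColCnt]
  | cons a as ih =>
    cases v with
    | nil => simp [pvColCnt]
    | cons b bs =>
      simp only [List.zip_cons_cons, List.map_cons, List.sum_cons, ih]
      have : pvColCnt (a :: as) (b :: bs) = (if a ≠ b then 1 else 0) + pvColCnt as bs := by
        simp only [pvColCnt, List.length_cons]
        rw [show min (as.length + 1) (bs.length + 1) = min as.length bs.length + 1 from by omega]
        rw [List.range_succ_eq_map, List.countP_cons, List.countP_map]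
        by_cases hab : a = b
        · simp [hab, Function.comp_def]
        · simp [hab, Function.comp_def]
          omega
      rw [this]
      push_cast
      ring

theorem pv_colCnt_eq_zero_iff (u v : List Char) (hl : u.length = v.length) :
    pvColCnt u v = 0 ↔ u = v := by
  rw [pvColCnt, List.countP_eq_zero]
  constructor
  · intro h
    apply List.ext_getElem hl
    intro i h1 h2
    have := h i (List.mem_range.mpr (by omega))
    simp only [Bool.not_eq_true', List.getD_eq_getElem?_getD,
      List.getElem?_eq_getElem h1, List.getElem?_eq_getElem h2, Option.getD_some] at this
    simpa using this
  · rintro rfl j hj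
    simp

theorem pv_colCnt_comm (u v : List Char) : pvColCnt u v = pvColCnt v u := by
  rw [pvColCnt, pvColCnt, Nat.min_comm]
  apply List.countP_congr
  intro x hx
  constructor <;> intro h <;> simp_all <;> exact fun e => h e.symm

theorem pv_colCnt_set (u v : List Char) (hl : u.length = v.length) (c : Nat) (hc : c < u.length) (x : Char) :
    (pvColCnt (u.set c x) v : Int) =
      (pvColCnt u v : Int) - (if u.getD c ' ' ≠ v.getD c ' ' then 1 else 0)
        + (if x ≠ v.getD c ' ' then 1 else 0) := by
  have hmin : min (u.set c x).length v.length = min u.length v.length := by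
    simp
  have hK : c < min u.length v.length := by omega
  have hsetc : (u.set c x).getD c ' ' = x := by
    rw [List.getD_eq_getElem?_getD, List.getElem?_eq_getElem (by simpa using hc), Option.getD_some,
      List.getElem_set_self]
  rw [pvColCnt, pvColCnt, hmin]
  rw [pv_countP_update (min u.length v.length) c _ (fun j => !(u.getD j ' ' == v.getD j ' ')) hK]
  · rw [hsetc]
    by_cases h1 : u.getD c ' ' = v.getD c ' ' <;> by_cases h2 : x = v.getD c ' ' <;>
      simp [h2]
  · intro t ht hne
    have hgd : (u.set c x).getD t ' ' = u.getD t ' ' := by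
      rw [List.getD_eq_getElem?_getD, List.getD_eq_getElem?_getD, List.getElem?_set_ne (by omega)]
    rw [hgd]

theorem pv_row_diff_eq (g : List (List Char)) (i j : Nat) :
    pv_row_diff g (i : Int) (j : Int) =
      if (pvRow g i).length ≠ (pvRow g j).length then none
      else some (pvColCnt (pvRow g i) (pvRow g j) : Int) := by
  simp only [pv_row_diff, PySem.List.pyGetD_natCast, pvRow, pv_zip_sum_ne]

theorem pv_row_diff_ne_zero (g : List (List Char)) (i j : Nat) :
    (pv_row_diff g (i : Int) (j : Int) ≠ some 0) ↔ pvRow g i ≠ pvRow g j := by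
  rw [pv_row_diff_eq]
  by_cases hl : (pvRow g i).length = (pvRow g j).length
  · simp only [hl, ne_eq, not_true_eq_false, if_false, Option.some.injEq]
    rw [show ((pvColCnt (pvRow g i) (pvRow g j) : Int) = 0 ↔ pvColCnt (pvRow g i) (pvRow g j) = 0) from by omega]
    rw [pv_colCnt_eq_zero_iff _ _ hl]
  · simp only [ne_eq, hl, not_false_eq_true, if_true]
    exact ⟨fun _ he => hl (by rw [he]), fun _ => by simp⟩

theorem pv_widthAt (g : List (List Char)) (y : Nat) (hy : y + 1 < g.length) :
    PySem.List.pyGetD (pv_mk_width (g.length : Int)) (y : Int) 0 = (pvK g.length y : Int) := by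
  rw [pv_mk_width, show ((g.length : Int) - 1) = ((g.length - 1 : Nat) : Int) from by omega]
  rw [PySem.List.pyGetD_map_pyRange _ (g.length - 1) y _ (by omega)]
  simp only [pvK]
  omega

theorem pv_mAt (g : List (List Char)) (i t : Nat) (hi : i < g.length) (hj : i + 1 + 2 * t < g.length) :
    PySem.List.pyGetD (PySem.List.pyGetD (pv_mk_m g (g.length : Int)) (i : Int) []) (t : Int) none =
      pv_row_diff g (i : Int) ((i + 1 + 2 * t : Nat) : Int) := by
  rw [pv_mk_m, PySem.List.pyGetD_map_pyRange _ g.length i _ (by omega)]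
  rw [PySem.List.pyRange_of_pos _ _ (by norm_num : (0:Int) < 2)]
  rw [List.map_map]
  have hcnt : (if (i : Int) + 1 < (g.length : Int) then
      (((g.length : Int) - ((i : Int) + 1) + 2 - 1) / 2).toNat else 0) = (g.length - i) / 2 := by
    rw [if_pos (by omega)]
    omega
  rw [hcnt]
  have ht : t < (g.length - i) / 2 := by omega
  rw [PySem.List.pyGetD_natCast, List.getD_eq_getElem?_getD,
    List.getElem?_eq_getElem (by simpa using ht), Option.getD_some]
  simp only [List.getElem_map, List.getElem_range, Function.comp_apply]
  congr 1

theorem pv_baseAt (g : List (List Char)) (y : Nat) (hy : y + 1 < g.length) :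
    PySem.List.pyGetD
      (pv_mk_base (pv_mk_m g (g.length : Int)) (pv_mk_width (g.length : Int)) (g.length : Int))
      (y : Int) 0 = (pvCnt g y : Int) := by
  rw [pv_mk_base, show ((g.length : Int) - 1) = ((g.length - 1 : Nat) : Int) from by omega]
  rw [PySem.List.pyGetD_map_pyRange _ (g.length - 1) y _ (by omega)]
  rw [pv_widthAt g y hy, PySem.List.pyRange_zero_natCast, List.map_map]
  have hmap : ∀ t ∈ List.range (pvK g.length y),
      ((fun t : Int => if PySem.List.pyGetD (PySem.List.pyGetD (pv_mk_m g (g.length : Int)) ((y : Int) - t) []) t none ≠ some 0 then (1 : Int) else 0) ∘ (fun k : Nat => (k : Int))) t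
        = (fun t : Nat => if pvBad g y t then (1 : Int) else 0) t := by
    intro t ht
    simp only [List.mem_range, pvK] at ht
    simp only [Function.comp_apply]
    rw [show ((y : Int) - (t : Int)) = ((y - t : Nat) : Int) from by omega]
    rw [pv_mAt g (y - t) t (by omega) (by omega)]
    have he : y - t + 1 + 2 * t = y + 1 + t := by omega
    by_cases hb : pvBad g y t
    · rw [if_pos, if_pos hb]
      rw [pv_row_diff_ne_zero, he]
      simpa [pvBad] using hb
    · rw [if_neg, if_neg hb]
      rw [pv_row_diff_ne_zero, he]
      simpa [pvBad] using hb
  rw [List.map_congr_left hmap, PySem.List.sum_map_ite_one_zero (pvBad g y)]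
  rfl

theorem pv_row_set_self (g : List (List Char)) (r : Nat) (u : List Char) (hr : r < g.length) :
    pvRow (g.set r u) r = u := by
  simp [pvRow, List.getD_eq_getElem?_getD, hr]

theorem pv_row_set_ne (g : List (List Char)) (r : Nat) (u : List Char) (i : Nat) (hi : i ≠ r) :
    pvRow (g.set r u) i = pvRow g i := by
  simp [pvRow, List.getD_eq_getElem?_getD, List.getElem?_set_ne (Ne.symm hi)]

theorem pv_bad_set_ne (g : List (List Char)) (r : Nat) (u : List Char) (y t : Nat)
    (h1 : y - t ≠ r) (h2 : y + 1 + t ≠ r) :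
    pvBad (g.set r u) y t = pvBad g y t := by
  simp [pvBad, pv_row_set_ne g r u _ h1, pv_row_set_ne g r u _ h2]

theorem pv_bad_ne_iff (g : List (List Char)) (y t : Nat) :
    pvBad g y t = true ↔ pvRow g (y - t) ≠ pvRow g (y + 1 + t) := by
  simp [pvBad]


theorem pv_u_eq (g : List (List Char)) (r c : Nat) (hr : r < g.length)
    (hc : c < (pvRow g r).length) (fl : Char) (y : Nat) (hy : y + 1 < g.length) :
    (if (y : Int) - min (r : Int) (2 * (y : Int) + 1 - (r : Int)) < ((pvK g.length y : Nat) : Int) then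
      match PySem.List.pyGetD (PySem.List.pyGetD (pv_mk_m g (g.length : Int))
          (min (r : Int) (2 * (y : Int) + 1 - (r : Int))) []) ((y : Int) - min (r : Int) (2 * (y : Int) + 1 - (r : Int))) none with
      | none => (pvCnt g y : Int)
      | some mm =>
        (pvCnt g y : Int) +
          ((if (mm - (if (pvRow g r).getD c ' ' ≠ PySem.List.pyGetD (PySem.List.pyGetD g (2 * (y : Int) + 1 - (r : Int)) []) (c : Int) ' ' then (1 : Int) else 0)
              + (if fl ≠ PySem.List.pyGetD (PySem.List.pyGetD g (2 * (y : Int) + 1 - (r : Int)) []) (c : Int) ' ' then 1 else 0)) ≠ 0 then (1 : Int) else 0)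
            - (if mm ≠ 0 then 1 else 0))
    else (pvCnt g y : Int)) = (pvCnt (g.set r ((pvRow g r).set c fl)) y : Int) := by
  have hKy : pvK g.length y ≤ y + 1 := by simp [pvK]
  have hKL : pvK g.length y ≤ g.length - 1 - y := by simp [pvK]
  set t0 : Nat := if r ≤ y then y - r else r - y - 1 with ht0
  set g' : List (List Char) := g.set r ((pvRow g r).set c fl) with hg'
  have htI : (y : Int) - min (r : Int) (2 * (y : Int) + 1 - (r : Int)) = (t0 : Int) := by
    rw [ht0]; split_ifs <;> omega
  have hcnt' : (pvCnt g' y : Int) =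
      ((List.range (pvK g.length y)).countP (pvBad g' y) : Int) := by
    simp [pvCnt, hg', List.length_set]
  have hne_t0 : ∀ t, t < pvK g.length y → t ≠ t0 → y - t ≠ r ∧ y + 1 + t ≠ r := by
    intro t ht hne
    rw [ht0] at hne
    by_cases hry : r ≤ y <;> simp [hry] at hne <;> omega
  rw [htI, hcnt']
  by_cases hbr : t0 < pvK g.length y
  · rw [if_pos (by exact_mod_cast hbr)]
    have hloi : min (r : Int) (2 * (y : Int) + 1 - (r : Int)) = (((y - t0 : Nat) : Nat) : Int) := by
      rw [ht0]; split_ifs <;> omega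
    have hhival : (y - t0) + 1 + 2 * t0 = y + 1 + t0 := by omega
    rw [hloi, pv_mAt g (y - t0) t0 (by omega) (by omega), hhival, pv_row_diff_eq]
    have hrmem : r = y - t0 ∨ r = y + 1 + t0 := by rw [ht0]; split_ifs <;> omega
    have hlon : y - t0 ≠ y + 1 + t0 := by omega
    have hrne : (2 * (y : Int) + 1 - (r : Int)) ≠ (r : Int) := by omega
    by_cases hlen : (pvRow g (y - t0)).length = (pvRow g (y + 1 + t0)).length
    · rw [if_neg (by simpa using hlen)]
      simp only []
      have hagree : ∀ t, t < pvK g.length y → t ≠ t0 → pvBad g' y t = pvBad g y t := by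
        intro t ht hne
        have h2 := hne_t0 t ht hne
        rw [hg']
        exact pv_bad_set_ne g r _ y t h2.1 h2.2
      have hupd := pv_countP_update (pvK g.length y) t0 (pvBad g' y) (pvBad g y) hbr hagree
      have hold : ((pvColCnt (pvRow g (y - t0)) (pvRow g (y + 1 + t0)) : Int) ≠ 0) ↔
          pvBad g y t0 = true := by
        rw [pv_bad_ne_iff]
        rw [show ((pvColCnt (pvRow g (y - t0)) (pvRow g (y + 1 + t0)) : Int) ≠ 0) ↔
            pvColCnt (pvRow g (y - t0)) (pvRow g (y + 1 + t0)) ≠ 0 from by omega]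
        rw [ne_eq, pv_colCnt_eq_zero_iff _ _ hlen]
      rcases hrmem with hR | hR
      · -- flipped row is the upper row of the pair
        have hry : r ≤ y := by omega
        have hne2 : y + 1 + t0 ≠ r := by omega
        have hpN : (2 * (y : Int) + 1 - (r : Int)) = (((y + 1 + t0 : Nat)) : Int) := by
          rw [ht0]; push_cast [hry]; omega
        rw [hpN]
        simp only [PySem.List.pyGetD_natCast]
        have hrow : List.getD g (y + 1 + t0) [] = pvRow g (y + 1 + t0) := rfl
        rw [hrow]
        rw [show y - t0 = r from hR.symm] at hlen hold ⊢
        have hset := pv_colCnt_set (pvRow g r) (pvRow g (y + 1 + t0)) hlen c hc fl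
        have hnewrow : pvRow g' r = (pvRow g r).set c fl := by
          rw [hg']; exact pv_row_set_self g r _ hr
        have hothrow : pvRow g' (y + 1 + t0) = pvRow g (y + 1 + t0) := by
          rw [hg']; exact pv_row_set_ne g r _ _ hne2
        have hnew : (((pvColCnt (pvRow g r) (pvRow g (y + 1 + t0)) : Int)
              - (if (pvRow g r).getD c ' ' ≠ (pvRow g (y + 1 + t0)).getD c ' ' then (1 : Int) else 0)
              + (if fl ≠ (pvRow g (y + 1 + t0)).getD c ' ' then (1 : Int) else 0)) ≠ 0) ↔
            pvBad g' y t0 = true := by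
          rw [← hset, pv_bad_ne_iff, show y - t0 = r from hR.symm, hnewrow, hothrow]
          rw [show (((pvColCnt ((pvRow g r).set c fl) (pvRow g (y + 1 + t0)) : Int)) ≠ 0) ↔
              pvColCnt ((pvRow g r).set c fl) (pvRow g (y + 1 + t0)) ≠ 0 from by omega]
          rw [ne_eq, pv_colCnt_eq_zero_iff _ _ (by simpa using hlen)]
        rw [hupd]
        simp only [hnew, hold]
        have hfold : (pvCnt g y : Int) =
            ((List.range (pvK g.length y)).countP (pvBad g y) : Int) := rfl
        rw [hfold]
        ring
      · -- flipped row is the lower row of the pair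
        have hne2 : y - t0 ≠ r := by omega
        have hpN : (2 * (y : Int) + 1 - (r : Int)) = (((y - t0 : Nat)) : Int) := by omega
        rw [hpN]
        simp only [PySem.List.pyGetD_natCast]
        have hrow : List.getD g (y - t0) [] = pvRow g (y - t0) := rfl
        rw [hrow]
        rw [show y + 1 + t0 = r from hR.symm] at hlen hold ⊢
        have hcomm : pvColCnt (pvRow g (y - t0)) (pvRow g r) =
            pvColCnt (pvRow g r) (pvRow g (y - t0)) := pv_colCnt_comm _ _
        rw [hcomm] at hold ⊢
        have hset := pv_colCnt_set (pvRow g r) (pvRow g (y - t0)) hlen.symm c hc fl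
        have hnewrow : pvRow g' r = (pvRow g r).set c fl := by
          rw [hg']; exact pv_row_set_self g r _ hr
        have hothrow : pvRow g' (y - t0) = pvRow g (y - t0) := by
          rw [hg']; exact pv_row_set_ne g r _ _ hne2
        have hnew : (((pvColCnt (pvRow g r) (pvRow g (y - t0)) : Int)
              - (if (pvRow g r).getD c ' ' ≠ (pvRow g (y - t0)).getD c ' ' then (1 : Int) else 0)
              + (if fl ≠ (pvRow g (y - t0)).getD c ' ' then (1 : Int) else 0)) ≠ 0) ↔
            pvBad g' y t0 = true := by
          rw [← hset, pv_bad_ne_iff, show y + 1 + t0 = r from hR.symm, hnewrow, hothrow]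
          rw [show (((pvColCnt ((pvRow g r).set c fl) (pvRow g (y - t0)) : Int)) ≠ 0) ↔
              pvColCnt ((pvRow g r).set c fl) (pvRow g (y - t0)) ≠ 0 from by omega]
          rw [ne_eq, pv_colCnt_eq_zero_iff _ _ (by simpa using hlen.symm)]
          exact not_congr eq_comm
        rw [hupd]
        simp only [hnew, hold]
        have hfold : (pvCnt g y : Int) =
            ((List.range (pvK g.length y)).countP (pvBad g y) : Int) := rfl
        rw [hfold]
        ring
    · rw [if_pos (by simpa using hlen)]
      have hstep : ∀ t ∈ List.range (pvK g.length y), pvBad g' y t = pvBad g y t := by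
        intro t ht
        by_cases hte : t = t0
        · subst hte
          have hgbad : pvBad g y t0 = true := by
            rw [pv_bad_ne_iff]
            exact fun he => hlen (by rw [he])
          have hgbad' : pvBad g' y t0 = true := by
            rw [pv_bad_ne_iff]
            intro he
            apply hlen
            have hlength := congrArg List.length he
            rcases hrmem with hR | hR
            · have hne2 : y + 1 + t0 ≠ r := by omega
              rw [hg', show y - t0 = r from hR.symm] at hlength
              rw [show y - t0 = r from hR.symm]
              rw [pv_row_set_self g r _ hr, pv_row_set_ne g r _ _ hne2] at hlength
              simpa using hlength
            · have hne2 : y - t0 ≠ r := by omega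
              rw [hg', show y + 1 + t0 = r from hR.symm] at hlength
              rw [show y + 1 + t0 = r from hR.symm]
              rw [pv_row_set_self g r _ hr, pv_row_set_ne g r _ _ hne2] at hlength
              simpa using hlength
          rw [hgbad, hgbad']
        · have h2 := hne_t0 t (List.mem_range.mp ht) hte
          rw [hg']
          exact pv_bad_set_ne g r _ y t h2.1 h2.2
      rw [List.countP_congr (fun x hx => by rw [hstep x hx])]
      rfl
  · rw [if_neg (by exact_mod_cast hbr)]
    have hstep : ∀ t ∈ List.range (pvK g.length y), pvBad g' y t = pvBad g y t := by
      intro t ht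
      have htK := List.mem_range.mp ht
      have h2 := hne_t0 t htK (Nat.ne_of_lt (lt_of_lt_of_le htK (Nat.le_of_not_lt hbr)))
      rw [hg']
      exact pv_bad_set_ne g r _ y t h2.1 h2.2
    rw [List.countP_congr (fun x hx => by rw [hstep x hx])]
    rfl

theorem pv_flip_set_eq (g : List (List Char)) (n : Int) (r c : Nat) (hr : r < g.length)
    (hc : c < (pvRow g r).length) (ch : Char) (hch : ch = (pvRow g r).getD c ' ') :
    pv_flip_set g n (pv_mk_m g (g.length : Int)) (pv_mk_width (g.length : Int))
        (pv_mk_base (pv_mk_m g (g.length : Int)) (pv_mk_width (g.length : Int)) (g.length : Int))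
        (g.length : Int) (r : Int) ((c : Int), ch) =
      pv_find_reflections (g.set r ((pvRow g r).set c (if ch == '.' then '#' else '.'))) n := by
  subst hch
  have hlen' : (g.set r ((pvRow g r).set c
      (if (pvRow g r).getD c ' ' == '.' then '#' else '.'))).length = g.length :=
    List.length_set ..
  rw [pv_flip_set, pv_find_reflections, hlen']
  have hL1 : ((g.length : Int) - 1) = ((g.length - 1 : Nat) : Int) := by omega
  rw [hL1, PySem.List.pyRange_zero_natCast, List.foldl_map, List.foldl_map]
  apply PySem.List.foldl_congr_mem
  intro acc yn hyn
  have hy : yn + 1 < g.length := by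
    have := List.mem_range.mp hyn
    omega
  simp only []
  rw [pv_condA _ yn (by simpa using hy)]
  rw [pv_baseAt g yn hy, pv_widthAt g yn hy]
  rw [pv_u_eq g r c hr hc _ yn hy]
  have hcast : ∀ m : Nat, (((m : Nat) : Int) == 0) = (m == 0) := by
    intro m
    cases h : m == 0
    · simp only [beq_eq_false_iff_ne] at h
      simp only [beq_eq_false_iff_ne]
      omega
    · simp only [beq_iff_eq] at h
      simp [h]
  rw [hcast]

-- ===== VERDICT =====
theorem find_new_reflections_py_spec : Claim_equal_find_new_reflections_py := by
  intro pattern n _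
  show find_new_reflections_py pattern n = find_new_reflections_py_alt pattern n
  rw [find_new_reflections_py, find_new_reflections_py_alt]
  simp only [PySem.List.foldl_append_singleton_eq_map, PySem.List.foldl_append_eq_flatMap,
    List.nil_append]
  rw [PySem.List.enumerate_eq_map_pyRange (pattern.map (fun row => row.toList)) []]
  rw [show PySem.List.len (pattern.map (fun row => row.toList)) =
      ((pattern.map (fun row => row.toList)).length : Int) from by simp [PySem.List.len]]
  rw [List.flatMap_map]
  apply List.flatMap_congr
  intro rI hrI
  have hr0 := (PySem.List.mem_pyRange_one.mp hrI).1
  have hrL := (PySem.List.mem_pyRange_one.mp hrI).2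
  set g : List (List Char) := pattern.map (fun row => row.toList) with hgdef
  have hrn : rI = ((rI.toNat : Nat) : Int) := by omega
  have hrlt : rI.toNat < g.length := by omega
  rw [hrn, PySem.List.pyGetD_natCast]
  have hrowfold : List.getD g rI.toNat [] = pvRow g rI.toNat := rfl
  rw [hrowfold]
  apply List.map_congr_left
  intro xc hxc
  rcases (PySem.List.mem_enumerate_iff _ _ _).mp hxc with ⟨k, hk, hxceq⟩
  subst hxceq
  simp only [zero_add]
  have hgd : (pvRow g rI.toNat)[k] = (pvRow g rI.toNat).getD k ' ' := by
    rw [List.getD_eq_getElem?_getD, List.getElem?_eq_getElem hk, Option.getD_some]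
  rw [pv_flip_set_eq g n rI.toNat k hrlt hk _ hgd]
  simp only [PySem.List.pySetD_natCast]
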